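-- pv_equiv track=rewrite | github.com/OliwierKossak/Sudoku-Generator | sudoku generator.py | _evaluate_matrix3x3
-- ===== SOURCE A (Python) =====
-- def _evaluate_matrix3x3(board: list[list[int]]):
--
--     matrix_score = 0
--     for i in range(0, 9, 3):
--         for j in range(0, 9, 3):
--             start_matrix_score = 45
--             row1 = board[i][j: j + 3]
--             row2 = board[i + 1][j: j + 3]
--             row3 = board[i + 2][j: j + 3]
--             current_matrix_score = sum(row1) + sum(row2) + sum(row3)
--             start_matrix_score -= current_matrix_score
--             matrix_score += abs(start_matrix_score)
--             row1, row2, row3, start_matrix_score, current_matrix_score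
--     return matrix_score
-- ===== SOURCE B (Python) =====
-- def _evaluate_matrix3x3(board: list[list[int]]):
--     # Stage 1: map each of the 9 rows to its triple of segment sums (slices truncate like A's).
--     segs = [(sum(board[i][0:3]), sum(board[i][3:6]), sum(board[i][6:9])) for i in range(9)]
--
--     # Stage 2: recursively consume the triples three rows (one band) at a time.
--     def score(rows):
--         if not rows:
--             return 0
--         (a1, b1, c1), (a2, b2, c2), (a3, b3, c3) = rows[0], rows[1], rows[2]
--         return (abs(45 - (a1 + a2 + a3))
--                 + abs(45 - (b1 + b2 + b3))
--                 + abs(45 - (c1 + c2 + c3))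
--                 + score(rows[3:]))
--
--     return score(segs)
-- ===== Notes on version B (the rewrite author's own statement) =====
-- stated objective: alternative
-- what changed: Replaces A's nested block-by-block loops with two stages: a comprehension mapping each row to its triple of segment sums, then a recursive consumer that scores one band (three triples) per call.
import Mathlib
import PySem

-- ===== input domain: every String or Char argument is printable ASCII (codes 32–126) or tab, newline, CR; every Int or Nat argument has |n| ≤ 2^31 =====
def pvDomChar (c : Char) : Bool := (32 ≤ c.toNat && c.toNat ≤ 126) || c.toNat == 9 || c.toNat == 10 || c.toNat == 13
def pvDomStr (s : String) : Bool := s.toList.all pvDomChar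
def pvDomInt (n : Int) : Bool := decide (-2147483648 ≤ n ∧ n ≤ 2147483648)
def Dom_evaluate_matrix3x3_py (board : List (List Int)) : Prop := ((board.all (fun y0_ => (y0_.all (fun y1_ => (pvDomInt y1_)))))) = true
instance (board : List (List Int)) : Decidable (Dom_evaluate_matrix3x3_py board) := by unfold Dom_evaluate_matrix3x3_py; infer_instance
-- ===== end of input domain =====

-- B stages the work: a comprehension maps each row to its triple of segment sums, then a recursive consumer scores one band (three triples) per call; objective: alternative decomposition (no speed claim).

-- ===== PORT A =====
def evaluate_matrix3x3_py (board : List (List Int)) : Int :=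
  (PySem.List.pyRange 0 9 3).foldl (fun matrix_score i =>
    (PySem.List.pyRange 0 9 3).foldl (fun matrix_score j =>
      let start_matrix_score : Int := 45
      let row1 := PySem.List.slice (PySem.List.pyGetD board i []) (some j) (some (j + 3))
      let row2 := PySem.List.slice (PySem.List.pyGetD board (i + 1) []) (some j) (some (j + 3))
      let row3 := PySem.List.slice (PySem.List.pyGetD board (i + 2) []) (some j) (some (j + 3))
      let current_matrix_score := row1.sum + row2.sum + row3.sum
      let start_matrix_score := start_matrix_score - current_matrix_score
      matrix_score + |start_matrix_score|) matrix_score) 0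

-- ===== PORT B =====
-- recursive band scorer from Source B; the final catch-all arm is unreachable in Source B
-- (segs always has length 9; Python would raise on a 1- or 2-element tail)
def pvScoreBands : List (Int × Int × Int) → Int
  | [] => 0
  | (a1, b1, c1) :: (a2, b2, c2) :: (a3, b3, c3) :: rest =>
      |45 - (a1 + a2 + a3)| + |45 - (b1 + b2 + b3)| + |45 - (c1 + c2 + c3)|
        + pvScoreBands rest
  | _ => 0

def evaluate_matrix3x3_py_alt (board : List (List Int)) : Int :=
  let segs := (PySem.List.pyRange 0 9 1).map (fun i =>
    let row := PySem.List.pyGetD board i []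
    ((PySem.List.slice row (some 0) (some 3)).sum,
     (PySem.List.slice row (some 3) (some 6)).sum,
     (PySem.List.slice row (some 6) (some 9)).sum))
  pvScoreBands segs

-- ===== PRECONDITION & SPEC =====
-- A (and B) index board rows 0..8, raising IndexError on boards with fewer than 9 rows; Pre_ excludes exactly those.
def Pre_evaluate_matrix3x3_py (board : List (List Int)) : Prop := 9 ≤ board.length
instance (board : List (List Int)) : Decidable (Pre_evaluate_matrix3x3_py board) := by unfold Pre_evaluate_matrix3x3_py; infer_instance

def pvWitness_evaluate_matrix3x3_py : List (List Int) :=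
  [[1,2,3],[4,5,6],[7,8,9],[1],[2],[3],[],[],[9,9,9,9,9,9,9,9,9]]

def Spec_evaluate_matrix3x3_py (board : List (List Int)) (out : Int) : Prop := out = evaluate_matrix3x3_py_alt board
instance (board : List (List Int)) (out : Int) : Decidable (Spec_evaluate_matrix3x3_py board out) := by unfold Spec_evaluate_matrix3x3_py; infer_instance

-- ===== CLAIM (what is proved, stated in full; the proofs are below) =====
def Claim_equal_evaluate_matrix3x3_py : Prop := ∀ (board : List (List Int)), Dom_evaluate_matrix3x3_py board → Pre_evaluate_matrix3x3_py board → Spec_evaluate_matrix3x3_py board (evaluate_matrix3x3_py board)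

-- ===== LEMMAS AND PROOFS =====

-- ===== VERDICT (by name: the statement is the Claim_ definition above) =====
set_option maxHeartbeats 1600000 in
theorem evaluate_matrix3x3_py_spec : Claim_equal_evaluate_matrix3x3_py := by
  intro board _ hpre
  unfold Spec_evaluate_matrix3x3_py
  unfold Pre_evaluate_matrix3x3_py at hpre
  obtain ⟨r0, r1, r2, r3, r4, r5, r6, r7, r8, rest, rfl⟩ :
      ∃ r0 r1 r2 r3 r4 r5 r6 r7 r8 rest,
        board = r0 :: r1 :: r2 :: r3 :: r4 :: r5 :: r6 :: r7 :: r8 :: rest := by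
    match board, hpre with
    | a::b::c::d::e::f::g::h::i::t, _ => exact ⟨a,b,c,d,e,f,g,h,i,t, rfl⟩
  have h3 : PySem.List.pyRange 0 9 3 = [0, 3, 6] := by decide
  have h1 : PySem.List.pyRange 0 9 1 = [0, 1, 2, 3, 4, 5, 6, 7, 8] := by decide
  norm_num [evaluate_matrix3x3_py, evaluate_matrix3x3_py_alt, h3, h1, List.foldl,
    pvScoreBands, PySem.List.pyGetD_ofNat']
  ring_nf
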